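-- pv_equiv track=rewrite | github.com/gadievron/raptor | core/sandbox/seatbelt.py | _quote_sbpl
-- ===== SOURCE A (Python) =====
-- def _quote_sbpl(s: str) -> str:
--     """Quote a string literal for SBPL. SBPL uses double-quoted strings
--     with backslash escapes for embedded quotes/backslashes.
--
--     Rejects control characters (newline, NUL, anything <0x20). The
--     SBPL parser is whitespace-sensitive: a path containing `\\n` would
--     close the current s-expression and inject a fresh clause —
--     `output="/tmp/x\\n(allow file-write*)"` becomes a profile that
--     grants blanket write. Realpath canonicalisation only protects
--     paths that exist as inodes; caller-supplied writable_paths /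
--     readable_paths come straight from kwargs and may not exist yet
--     (or may have been crafted by a malicious caller passing through).
--     Rejecting control chars at the quoter closes the injection
--     surface uniformly for every (subpath ...) / (literal ...) clause.
--     """
--     if any(ord(c) < 0x20 for c in s):
--         bad = next(c for c in s if ord(c) < 0x20)
--         raise ValueError(
--             f"SBPL string contains control character "
--             f"(ord {ord(bad)}); refusing to quote — would let an "
--             f"attacker-controlled path inject SBPL clauses. Got: "
--             f"{s!r}"
--         )
--     return '"' + s.replace("\\", "\\\\").replace('"', '\\"') + '"'
-- ===== SOURCE B (Python) =====
-- def _quote_sbpl(s: str) -> str: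
--     """Single pass: validate control chars and escape backslash/quote in one loop."""
--     parts = []
--     for c in s:
--         if ord(c) < 0x20:
--             raise ValueError(
--                 f"SBPL string contains control character "
--                 f"(ord {ord(c)}); refusing to quote — would let an "
--                 f"attacker-controlled path inject SBPL clauses. Got: "
--                 f"{s!r}"
--             )
--         if c == "\\":
--             parts.append("\\\\")
--         elif c == '"':
--             parts.append('\\"')
--         else:
--             parts.append(c)
--     return '"' + "".join(parts) + '"'
-- ===== Notes on version B (the rewrite author's own statement) =====
-- stated objective: alternative
-- what changed: Replaces A's any()-scan + next()-scan + two full .replace passes with one single-pass loop that validates each char and appends its escape to a parts list joined at the end.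
import Mathlib
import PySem

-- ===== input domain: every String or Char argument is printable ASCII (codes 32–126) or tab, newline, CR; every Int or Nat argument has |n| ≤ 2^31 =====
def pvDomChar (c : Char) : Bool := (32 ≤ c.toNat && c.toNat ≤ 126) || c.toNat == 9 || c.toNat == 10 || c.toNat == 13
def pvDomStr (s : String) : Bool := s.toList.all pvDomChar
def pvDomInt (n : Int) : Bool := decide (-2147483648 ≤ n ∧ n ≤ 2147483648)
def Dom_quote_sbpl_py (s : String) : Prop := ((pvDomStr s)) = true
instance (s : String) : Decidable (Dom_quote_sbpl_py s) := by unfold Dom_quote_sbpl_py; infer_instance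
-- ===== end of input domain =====

-- B merges A's validation scans and two .replace passes into one char-by-char traversal (alternative decomposition, same cost class).

-- ===== PORT A =====
-- A: if any control char, Python raises ValueError (excluded by Pre_); else
-- '"' + s.replace("\\", "\\\\").replace('"', '\\"') + '"'.
def quote_sbpl_py (s : String) : String :=
  if s.toList.any (fun c => c.toNat < 32) then ""  -- Python raises ValueError here; outside Pre_
  else "\"" ++ PySem.Str.replace (PySem.Str.replace s "\\" "\\\\") "\"" "\\\"" ++ "\""

-- ===== PORT B =====
-- B: one loop over the chars, accumulating the list `parts`, then '"' + ''.join(parts) + '"'.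
def quote_sbpl_py_alt (s : String) : String :=
  let parts : List String := s.toList.foldl (fun acc c =>
    if c.toNat < 32 then acc  -- Python raises ValueError here; outside Pre_
    else if c = '\\' then acc ++ ["\\\\"]
    else if c = '"' then acc ++ ["\\\""]
    else acc ++ [String.singleton c]) []
  "\"" ++ PySem.Str.join "" parts ++ "\""

-- ===== PRECONDITION & SPEC =====
-- Pre_ excludes exactly the strings containing a control character (code < 0x20), on which A raises ValueError.
def Pre_quote_sbpl_py (s : String) : Prop := (s.toList.all fun c => 32 ≤ c.toNat) = true
instance (s : String) : Decidable (Pre_quote_sbpl_py s) := by unfold Pre_quote_sbpl_py; infer_instance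
def pvWitness_quote_sbpl_py : String := "a\\b \"c\""
def Spec_quote_sbpl_py (s : String) (out : String) : Prop := out = quote_sbpl_py_alt s
instance (s : String) (out : String) : Decidable (Spec_quote_sbpl_py s out) := by unfold Spec_quote_sbpl_py; infer_instance

-- ===== CLAIM (what is proved, stated in full; the proofs are below) =====
def Claim_equal_quote_sbpl_py : Prop := ∀ (s : String), Dom_quote_sbpl_py s → Pre_quote_sbpl_py s → Spec_quote_sbpl_py s (quote_sbpl_py s)

-- ===== LEMMAS AND PROOFS =====

-- the per-char escape that both sides compute
def pvEsc (c : Char) : List Char :=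
  if c = '\\' then ['\\', '\\'] else if c = '"' then ['\\', '"'] else [c]

-- replace with a single-char pattern is a char-wise flatMap (invariant of Chars.replace.go)
theorem pv_go_single (a : Char) (r : List Char) :
    ∀ (l : List Char) (fuel : Nat) (acc : List Char), l.length ≤ fuel →
      PySem.Chars.replace.go [a] r fuel l acc
        = acc.reverse ++ l.flatMap (fun c => if c = a then r else [c]) := by
  intro l
  induction l with
  | nil =>
    intro fuel acc _
    cases fuel <;> simp [PySem.Chars.replace.go.eq_def]
  | cons c t ih =>
    intro fuel acc hle
    cases fuel with
    | zero => simp at hle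
    | succ n =>
      rw [PySem.Chars.replace.go.eq_def]
      simp only [List.isPrefixOf, Bool.and_true]
      by_cases hc : c = a
      · subst hc
        simp only [beq_self_eq_true, if_true, List.length_cons, List.length_nil,
          List.drop_succ_cons, List.drop_zero]
        rw [ih n (r.reverse ++ acc) (by simpa using hle)]
        simp
      · have hbeq : (a == c) = false := beq_eq_false_iff_ne.mpr (fun h => hc h.symm)
        simp only [hbeq, Bool.false_eq_true, if_false]
        rw [ih n (c :: acc) (by simpa using Nat.le_of_succ_le_succ hle)]
        simp [hc]

theorem pv_replace_single (cs : List Char) (a : Char) (r : List Char) :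
    PySem.Chars.replace cs [a] r = cs.flatMap (fun c => if c = a then r else [c]) := by
  unfold PySem.Chars.replace
  simp [pv_go_single a r cs cs.length [] (le_refl _)]

-- A's two replaces, composed, are exactly pvEsc char-wise
theorem pv_A_list (cs : List Char) :
    PySem.Chars.replace (PySem.Chars.replace cs ['\\'] ['\\','\\']) ['"'] ['\\','"']
      = cs.flatMap pvEsc := by
  rw [pv_replace_single, pv_replace_single]
  induction cs with
  | nil => simp
  | cons c t ih =>
    by_cases h1 : c = '\\' <;> by_cases h2 : c = '"' <;>
      simp_all [pvEsc]

-- join with empty separator flattens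
theorem pv_join_nil (xss : List (List Char)) : PySem.Chars.join [] xss = xss.flatten := by
  unfold PySem.Chars.join
  induction xss with
  | nil => rfl
  | cons x xs ih => cases xs <;> simp_all [List.intercalate, List.intersperse]

-- B's loop, under Pre_, appends one escaped piece per character
theorem pv_B_fold (cs : List Char) (h : ∀ c ∈ cs, ¬ c.toNat < 32) :
    (cs.foldl (fun acc c =>
      if c.toNat < 32 then acc
      else if c = '\\' then acc ++ ["\\\\"]
      else if c = '"' then acc ++ ["\\\""]
      else acc ++ [String.singleton c]) [])
    = cs.map (fun c => String.ofList (pvEsc c)) := by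
  rw [PySem.List.foldl_congr_mem cs _ (fun acc c => acc ++ [String.ofList (pvEsc c)]) []
      (by
        intro acc c hc
        have hctl := h c hc
        simp only [if_neg hctl]
        by_cases h1 : c = '\\' <;> by_cases h2 : c = '"' <;>
          simp_all [pvEsc, String.singleton]
        · rfl)]
  simpa using PySem.List.foldl_append_singleton_eq_map (fun c => String.ofList (pvEsc c)) cs []

-- ===== VERDICT (by name: the statement is the Claim_ definition above) =====
theorem quote_sbpl_py_spec : Claim_equal_quote_sbpl_py := by
  intro s _ hpre0
  have hpre : ∀ c ∈ s.toList, ¬ c.toNat < 32 := by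
    intro c hc
    have := List.all_eq_true.mp hpre0 c hc
    simp only [decide_eq_true_eq] at this
    omega
  unfold Spec_quote_sbpl_py quote_sbpl_py quote_sbpl_py_alt
  have hany : s.toList.any (fun c => decide (c.toNat < 32)) = false := by
    simp only [List.any_eq_false, decide_eq_true_eq]
    exact hpre
  rw [if_neg (by simp [hany])]
  apply String.toList_inj.mp
  simp only [String.toList_append, PySem.Str.toList_replace, PySem.Str.toList_join]
  have e1 : "\\".toList = ['\\'] := rfl
  have e2 : "\\\\".toList = ['\\','\\'] := rfl
  have e3 : "\"".toList = ['"'] := rfl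
  have e4 : "\\\"".toList = ['\\','"'] := rfl
  have e5 : ("" : String).toList = [] := rfl
  rw [e1, e2, e3, e4, e5, pv_A_list, pv_B_fold s.toList hpre]
  simp [pv_join_nil, List.flatMap_def, Function.comp_def, String.toList_ofList]
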